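-- pv_equiv track=rewrite | github.com/Pranavan135/ProjectEulerSolutions | 055.py | count
-- ===== SOURCE A (Python) =====
-- def is_palindrome(n):
--     return str(n) == str(n)[::-1]
--
-- def reverse_and_add(number):
--     reverse = int(str(number)[::-1])
--     return reverse + number
--
-- def count(limit):
--     d = {0: 1}
--
--     for i in range(1, limit + 1):
--         if is_palindrome(i):
--             if i in d:
--                 d[i] += 1
--             else:
--                 d[i] = 1
--             continue
--         else:
--             r = i
--             for j in range(60):
--                 r = reverse_and_add(r)
--                 if is_palindrome(r):
--                     if r in d:
--                         d[r] += 1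
--                     else:
--                         d[r] = 1
--                     break
--     return d
-- ===== SOURCE B (Python) =====
-- def count(limit):
--     d = {0: 1}
--     cache = {}  # x -> (p, s): from x the first palindrome is p, reached in s steps; s == 61 marks "none within 60"
--     for i in range(1, limit + 1):
--         p = _landing(i, cache)
--         if p is not None:
--             d[p] = d.get(p, 0) + 1
--     return d
--
-- def _landing(i, cache):
--     hit = cache.get(i)
--     if hit is not None:
--         p, s = hit
--         return p if s <= 60 else None
--     s = str(i)
--     if s == s[::-1]:
--         cache[i] = (i, 0)
--         return i
--     chain = [i]
--     r = i
--     for _ in range(60):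
--         r += int(str(r)[::-1])
--         chain.append(r)
--         s = str(r)
--         if s == s[::-1]:
--             k = len(chain) - 1
--             for j, x in enumerate(chain):
--                 cache[x] = (r, k - j)
--             return r
--     cache[i] = (i, 61)
--     return None
-- ===== Notes on version B (the rewrite author's own statement) =====
-- stated objective: alternative
-- what changed: B adds a persistent memo cache across iterations: a helper _landing records every reverse-and-add chain it walks (each chain element mapped to the palindrome reached and remaining step count, or a Lychrel marker), so a later start that was already seen as a chain element is answered by one lookup instead of re-walking, and the two duplicated dict-update branches collapse into one uniform counting update.
import Mathlib
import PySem

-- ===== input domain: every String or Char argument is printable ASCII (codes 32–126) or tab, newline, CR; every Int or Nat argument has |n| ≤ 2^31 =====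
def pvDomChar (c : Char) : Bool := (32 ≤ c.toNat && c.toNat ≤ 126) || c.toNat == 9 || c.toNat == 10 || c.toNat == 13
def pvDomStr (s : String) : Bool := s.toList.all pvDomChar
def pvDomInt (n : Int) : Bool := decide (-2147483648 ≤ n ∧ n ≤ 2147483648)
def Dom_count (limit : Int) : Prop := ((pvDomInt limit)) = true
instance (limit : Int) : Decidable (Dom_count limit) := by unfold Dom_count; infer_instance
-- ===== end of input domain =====

-- B keeps A's reverse-and-add counting but memoizes whole chains in a persistent
-- cache (element -> reached palindrome + remaining steps, or a Lychrel marker),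
-- answering repeated starts by lookup; one uniform counting update replaces A's
-- two duplicated branches. Alternative structure, same measured cost.


-- ===== PORT A =====
-- is_palindrome(n): str(n) == str(n)[::-1], on code points (exact)
def pvIsPal (n : Int) : Bool := PySem.Int.toChars n == (PySem.Int.toChars n).reverse

-- reverse_and_add(number): int(str(number)[::-1]) + number; '.getD 0' is unreachable for
-- number ≥ 0 (a reversed decimal-digit string always parses), the only values reached here
def pvRevAdd (n : Int) : Int := (PySem.Int.ofChars? (PySem.Int.toChars n).reverse).getD 0 + n

-- A's 'if r in d: d[r] += 1 else: d[r] = 1'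
def pvBumpA (d : PySem.Dict Int Int) (k : Int) : PySem.Dict Int Int :=
  if PySem.Dict.contains d k then PySem.Dict.insert d k (PySem.Dict.getD d k 0 + 1)
  else PySem.Dict.insert d k 1

-- A's inner 'for j in range(60)' with the break
def pvInnerA : Nat → Int → PySem.Dict Int Int → PySem.Dict Int Int
  | 0, _, d => d
  | fuel + 1, r, d =>
      let r' := pvRevAdd r
      if pvIsPal r' then pvBumpA d r' else pvInnerA fuel r' d

def count (limit : Int) : List (Int × Int) :=
  ((PySem.List.pyRange 1 (limit + 1) 1).foldl
    (fun d i => if pvIsPal i then pvBumpA d i else pvInnerA 60 i d)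
    (PySem.Dict.insert PySem.Dict.empty 0 1)).items

-- ===== PORT B =====
-- _landing's 'for _ in range(60)' over (r, chain); returns the palindrome and the
-- recorded chain on success, none after 60 fruitless steps
def pvBFresh : Nat → Int → List Int → Option (Int × List Int)
  | 0, _, _ => none
  | fuel + 1, r, chain =>
      let r' := pvRevAdd r
      let chain' := chain ++ [r']
      if pvIsPal r' then some (r', chain') else pvBFresh fuel r' chain'

-- _landing(i, cache): cache maps x to (p, s); s == 61 marks "no palindrome within 60"
def pvLandingB (cache : PySem.Dict Int (Int × Int)) (i : Int) :
    Option Int × PySem.Dict Int (Int × Int) :=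
  match PySem.Dict.get? cache i with
  | some ps => ((if ps.2 ≤ 60 then some ps.1 else none), cache)
  | none =>
      if pvIsPal i then (some i, PySem.Dict.insert cache i (i, 0))
      else
        match pvBFresh 60 i [i] with
        | some pc =>
            let k : Int := (pc.2.length : Int) - 1
            (some pc.1,
             (PySem.List.enumerate pc.2).foldl
               (fun c jx => PySem.Dict.insert c jx.2 (pc.1, k - jx.1)) cache)
        | none => (none, PySem.Dict.insert cache i (i, 61))

def count_alt (limit : Int) : List (Int × Int) :=
  (((PySem.List.pyRange 1 (limit + 1) 1).foldl
      (fun (st : PySem.Dict Int Int × PySem.Dict Int (Int × Int)) i =>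
        match pvLandingB st.2 i with
        | (some p, c') => (PySem.Dict.insert st.1 p (PySem.Dict.getD st.1 p 0 + 1), c')
        | (none, c') => (st.1, c'))
      (PySem.Dict.insert PySem.Dict.empty 0 1, PySem.Dict.empty)).1).items

-- ===== PRECONDITION & SPEC =====
def Spec_count (limit : Int) (out : List (Int × Int)) : Prop := out = count_alt limit
instance (limit : Int) (out : List (Int × Int)) : Decidable (Spec_count limit out) := by unfold Spec_count; infer_instance

-- ===== CLAIM (what is proved, stated in full; the proofs are below) =====
def Claim_equal_count : Prop := ∀ (limit : Int), Dom_count limit → Spec_count limit (count limit)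

-- ===== LEMMAS AND PROOFS =====
-- proof-side specification of what a cache entry means: the palindrome i ultimately
-- reaches under A's rule (itself if palindromic, else first within 60 steps)
def pvLandingLoop : Nat → Int → Option Int
  | 0, _ => none
  | fuel + 1, r =>
      let r' := pvRevAdd r
      if pvIsPal r' then some r' else pvLandingLoop fuel r'

def pvLanding (i : Int) : Option Int :=
  if pvIsPal i then some i else pvLandingLoop 60 i

def pvInvC (c : PySem.Dict Int (Int × Int)) : Prop :=
  ∀ x p s, PySem.Dict.get? c x = some (p, s) →
    pvLanding x = (if s ≤ 60 then some p else none)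

theorem pvBumpA_eq (d : PySem.Dict Int Int) (k : Int) :
    pvBumpA d k = PySem.Dict.insert d k (PySem.Dict.getD d k 0 + 1) := by
  unfold pvBumpA
  by_cases h : PySem.Dict.contains d k = true
  · simp [h]
  · have h0 : PySem.Dict.getD d k 0 = 0 :=
      PySem.Dict.getD_of_not_contains d 0 (by simpa using h)
    simp [h, h0]

theorem pvInnerA_eq (fuel : Nat) (r : Int) (d : PySem.Dict Int Int) :
    pvInnerA fuel r d =
      match pvLandingLoop fuel r with
      | some p => PySem.Dict.insert d p (PySem.Dict.getD d p 0 + 1)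
      | none => d := by
  induction fuel generalizing r with
  | zero => simp [pvInnerA, pvLandingLoop]
  | succ n ih =>
      simp only [pvInnerA, pvLandingLoop]
      by_cases h : pvIsPal (pvRevAdd r) = true
      · simp [h, pvBumpA_eq]
      · simp [h, ih]

theorem pvStepA_eq (d : PySem.Dict Int Int) (i : Int) :
    (if pvIsPal i then pvBumpA d i else pvInnerA 60 i d) =
      (match pvLanding i with
       | some p => PySem.Dict.insert d p (PySem.Dict.getD d p 0 + 1)
       | none => d) := by
  unfold pvLanding
  by_cases h : pvIsPal i = true
  · simp [h, pvBumpA_eq]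
  · simp [h, pvInnerA_eq]

theorem pvLandingLoop_mono {m n : Nat} {x p : Int} (hmn : m ≤ n)
    (h : pvLandingLoop m x = some p) : pvLandingLoop n x = some p := by
  induction m generalizing n x with
  | zero => simp [pvLandingLoop] at h
  | succ m ih =>
      obtain ⟨n', rfl⟩ : ∃ n', n = n' + 1 := ⟨n - 1, by omega⟩
      simp only [pvLandingLoop] at h ⊢
      by_cases hp : pvIsPal (pvRevAdd x) = true
      · simpa [hp] using h
      · simp only [hp] at h ⊢
        simp only [Bool.false_eq_true, if_false] at h ⊢
        exact ih (by omega) h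

theorem pvBFresh_none {fuel : Nat} {r : Int} {chain : List Int}
    (h : pvBFresh fuel r chain = none) : pvLandingLoop fuel r = none := by
  induction fuel generalizing r chain with
  | zero => simp [pvLandingLoop]
  | succ m ih =>
      simp only [pvBFresh] at h
      simp only [pvLandingLoop]
      by_cases hp : pvIsPal (pvRevAdd r) = true
      · simp [hp] at h
      · simp only [hp] at h ⊢
        simp only [Bool.false_eq_true, if_false] at h ⊢
        exact ih h

theorem pvBFresh_some {fuel : Nat} (hf : fuel ≤ 60) :
    ∀ {r : Int} {chain : List Int} {p : Int} {ch : List Int},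
      pvBFresh fuel r chain = some (p, ch) →
      pvLandingLoop fuel r = some p ∧
        ∃ suf, ch = chain ++ suf ∧ suf.length ≤ fuel ∧
          ∀ x ∈ suf, pvLanding x = some p := by
  induction fuel with
  | zero => intro r chain p ch h; simp [pvBFresh] at h
  | succ m ih =>
      intro r chain p ch h
      simp only [pvBFresh] at h
      simp only [pvLandingLoop]
      by_cases hp : pvIsPal (pvRevAdd r) = true
      · simp only [hp, if_true, Option.some.injEq, Prod.mk.injEq] at h
        obtain ⟨rfl, rfl⟩ := h
        refine ⟨by simp [hp], [pvRevAdd r], rfl, by simp, ?_⟩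
        intro x hx
        simp only [List.mem_singleton] at hx
        subst hx
        simp [pvLanding, hp]
      · simp only [hp] at h
        simp only [Bool.false_eq_true, if_false] at h
        obtain ⟨hloop, suf, rfl, hlen, hall⟩ := ih (by omega) h
        refine ⟨by simp [hp, hloop], pvRevAdd r :: suf, by simp, by simp; omega, ?_⟩
        intro x hx
        rcases List.mem_cons.mp hx with rfl | hx
        · have h60 : pvLandingLoop 60 (pvRevAdd r) = some p :=
            pvLandingLoop_mono (by omega) hloop
          simp [pvLanding, hp, h60]
        · exact hall x hx

theorem pvMem_enumerate {α : Type} {xs : List α} {s : Int} {jx : Int × α}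
    (h : jx ∈ PySem.List.enumerate xs s) : s ≤ jx.1 ∧ jx.2 ∈ xs := by
  induction xs generalizing s with
  | nil => simp [PySem.List.enumerate_nil] at h
  | cons y ys ih =>
      rw [PySem.List.enumerate_cons] at h
      rcases List.mem_cons.mp h with rfl | h
      · simp
      · obtain ⟨h1, h2⟩ := ih h
        exact ⟨by omega, List.mem_cons_of_mem _ h2⟩

theorem pvInvC_insert {c : PySem.Dict Int (Int × Int)} (hc : pvInvC c)
    {x p : Int} {s : Int} (hs : pvLanding x = (if s ≤ 60 then some p else none)) :
    pvInvC (PySem.Dict.insert c x (p, s)) := by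
  intro x' p' s' h
  rw [PySem.Dict.get?_insert] at h
  by_cases hx : x' = x
  · simp only [hx, if_true] at h
    obtain ⟨rfl, rfl⟩ : p = p' ∧ s = s' := by
      simpa [Prod.ext_iff] using h
    simpa [hx] using hs
  · simp only [hx, if_false] at h
    exact hc x' p' s' h

theorem pvInvC_foldl {p k : Int} :
    ∀ (l : List (Int × Int)) (c : PySem.Dict Int (Int × Int)), pvInvC c →
    (∀ jx ∈ l, k - jx.1 ≤ 60 ∧ pvLanding jx.2 = some p) →
    pvInvC (l.foldl (fun c jx => PySem.Dict.insert c jx.2 (p, k - jx.1)) c) := by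
  intro l
  induction l with
  | nil => intro c hc _; simpa using hc
  | cons jx l ih =>
      intro c hc hall
      simp only [List.foldl_cons]
      refine ih _ ?_ (fun y hy => hall y (List.mem_cons_of_mem _ hy))
      obtain ⟨hle, hland⟩ := hall jx (List.mem_cons_self ..)
      exact pvInvC_insert hc (by simp [hle, hland])

theorem pvLandingB_spec (c : PySem.Dict Int (Int × Int)) (i : Int) (hc : pvInvC c) :
    (pvLandingB c i).1 = pvLanding i ∧ pvInvC (pvLandingB c i).2 := by
  unfold pvLandingB
  cases hget : PySem.Dict.get? c i with
  | some ps =>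
      refine ⟨?_, hc⟩
      exact (hc i ps.1 ps.2 (by simpa using hget)).symm
  | none =>
      by_cases hp : pvIsPal i = true
      · refine ⟨by simp [hp, pvLanding], ?_⟩
        simp only [hp, if_true]
        exact pvInvC_insert hc (by simp [pvLanding, hp])
      · simp only [hp, Bool.false_eq_true, if_false]
        cases hf : pvBFresh 60 i [i] with
        | some pc =>
            obtain ⟨p, ch⟩ := pc
            obtain ⟨hloop, suf, rfl, hlen, hall⟩ := pvBFresh_some (le_refl 60) hf
            have hlandi : pvLanding i = some p := by simp [pvLanding, hp, hloop]
            constructor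
            · simpa using hlandi.symm
            · refine pvInvC_foldl _ c hc ?_
              intro jx hjx
              obtain ⟨hj0, hjmem⟩ := pvMem_enumerate hjx
              have hlenle : ([i] ++ suf).length ≤ 61 := by simp; omega
              constructor
              · simp only [List.length_append, List.length_cons] at hlenle ⊢
                omega
              · rcases List.mem_append.mp hjmem with hmem | hmem
                · simp only [List.mem_singleton] at hmem
                  rw [hmem]; exact hlandi
                · exact hall _ hmem
        | none =>
            have hloop : pvLandingLoop 60 i = none := pvBFresh_none hf
            have hlandi : pvLanding i = none := by simp [pvLanding, hp, hloop]
            exact ⟨by simpa using hlandi.symm,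
              pvInvC_insert hc (by simp [hlandi])⟩

theorem pvFold_eq :
    ∀ (l : List Int) (d : PySem.Dict Int Int) (c : PySem.Dict Int (Int × Int)),
      pvInvC c →
      (l.foldl
        (fun (st : PySem.Dict Int Int × PySem.Dict Int (Int × Int)) i =>
          match pvLandingB st.2 i with
          | (some p, c') => (PySem.Dict.insert st.1 p (PySem.Dict.getD st.1 p 0 + 1), c')
          | (none, c') => (st.1, c')) (d, c)).1 =
      l.foldl (fun d i => if pvIsPal i then pvBumpA d i else pvInnerA 60 i d) d := by
  intro l
  induction l with
  | nil => intro d c _; rfl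
  | cons i l ih =>
      intro d c hc
      obtain ⟨hfst, hsnd⟩ := pvLandingB_spec c i hc
      simp only [List.foldl_cons]
      cases hpb : pvLandingB c i with
      | mk p? c' =>
          rw [hpb] at hfst hsnd
          rw [pvStepA_eq, ← hfst]
          cases p? with
          | some p => exact ih _ c' hsnd
          | none => exact ih _ c' hsnd

-- ===== VERDICT (by name: the statement is the Claim_ definition above) =====
theorem count_spec : Claim_equal_count := by
  intro limit _
  unfold Spec_count count count_alt
  rw [pvFold_eq]
  intro x p s h
  simp [PySem.Dict.get?_empty] at h
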